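-- pv_equiv track=rewrite | github.com/CarlottaGiacchetta/AlphatensorFinal | prove/prova_action_space.py | all_coeff_vectors
-- ===== SOURCE A (Python) =====
-- from itertools import product
-- from itertools import product
--
-- def all_coeff_vectors(S=4, coeffs=(-1,0,1), max_nonzero=None):
--     # genera tutti i vettori di lunghezza S con valori in coeffs
--     # esclude il vettore zero; opzionalmente limita il numero di non-zero
--     out = []
--     for vec in product(coeffs, repeat=S):
--         if not any(vec):
--             continue
--         if max_nonzero and sum(c!=0 for c in vec) > max_nonzero:
--             continue
--         out.append(vec)
--     return out
-- ===== SOURCE B (Python) =====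
-- def all_coeff_vectors(S=4, coeffs=(-1,0,1), max_nonzero=None):
--     # Iterative level-by-level builder: extend partial vectors one position at a
--     # time, carrying each one's nonzero count and pruning a partial vector as
--     # soon as its count exceeds the (truthy) limit; finally drop the zero vector.
--     limit = max_nonzero if max_nonzero else None  # 0/None/falsy => no limit
--     level = [((), 0)]
--     for _ in range(S):
--         nxt = []
--         for vec, nz in level:
--             for c in coeffs:
--                 nz2 = nz + (c != 0)
--                 if limit is None or nz2 <= limit:
--                     nxt.append((vec + (c,), nz2))
--         level = nxt
--     return [vec for vec, nz in level if nz]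
-- ===== Notes on version B (the rewrite author's own statement) =====
-- stated objective: alternative
-- what changed: Replaces the materialise-full-cartesian-product-then-filter loop by an iterative level-by-level builder that extends partial vectors with a running nonzero count and prunes a partial vector as soon as its count exceeds the (truthy) max_nonzero limit.
import Mathlib
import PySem

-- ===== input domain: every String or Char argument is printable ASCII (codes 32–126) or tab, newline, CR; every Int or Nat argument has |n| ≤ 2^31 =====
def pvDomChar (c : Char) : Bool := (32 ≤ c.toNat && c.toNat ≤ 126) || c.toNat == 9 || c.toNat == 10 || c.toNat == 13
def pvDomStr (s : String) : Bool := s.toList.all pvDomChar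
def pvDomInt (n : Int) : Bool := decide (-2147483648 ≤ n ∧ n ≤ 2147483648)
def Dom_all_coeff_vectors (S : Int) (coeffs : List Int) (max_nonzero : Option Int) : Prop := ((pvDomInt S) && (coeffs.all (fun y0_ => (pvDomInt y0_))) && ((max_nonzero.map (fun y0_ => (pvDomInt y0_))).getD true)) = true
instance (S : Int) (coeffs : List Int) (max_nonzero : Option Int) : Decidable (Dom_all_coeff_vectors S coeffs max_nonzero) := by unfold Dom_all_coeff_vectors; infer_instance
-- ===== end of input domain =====

-- B replaces A's materialise-the-cartesian-product-then-filter loop by an iterative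
-- level-by-level builder that extends partial vectors with a running nonzero count
-- and prunes over-limit partials early (objective: alternative).


-- ===== PORT A =====
-- itertools.product(coeffs, repeat=n): lexicographic, first coordinate varies slowest
def pvProduct (coeffs : List Int) : Nat → List (List Int)
  | 0 => [[]]
  | n + 1 => coeffs.flatMap (fun c => (pvProduct coeffs n).map (fun t => c :: t))

-- 'max_nonzero and sum(c!=0 for c in vec) > max_nonzero' (truthiness: 0/None = no limit)
def pvOver (mx : Option Int) (vec : List Int) : Bool :=
  match mx with
  | some m => decide (m ≠ 0) && decide ((vec.countP (· ≠ 0) : Int) > m)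
  | none => false

def all_coeff_vectors (S : Int) (coeffs : List Int) (max_nonzero : Option Int) : List (List Int) :=
  if S < 0 then []  -- Python raises ValueError here (product rejects repeat < 0); excluded by Pre_
  else
    (pvProduct coeffs S.toNat).foldl (fun out vec =>
      if ¬ vec.any (· ≠ 0) then out
      else if pvOver max_nonzero vec then out
      else out ++ [vec]) []

-- ===== PORT B =====
-- 'limit is None or nz2 <= limit'
def pvKeep (limit : Option Int) (nz : Int) : Bool :=
  match limit with | some l => decide (nz ≤ l) | none => true

-- one pass of Source B's outer loop: extend every surviving (partial vector, count)
def pvStep (coeffs : List Int) (limit : Option Int) (level : List (List Int × Int)) : List (List Int × Int) :=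
  level.flatMap (fun p => coeffs.filterMap (fun c =>
    if pvKeep limit (p.2 + if c ≠ 0 then 1 else 0)
    then some (p.1 ++ [c], p.2 + if c ≠ 0 then 1 else 0) else none))

-- 'max_nonzero if max_nonzero else None'
def pvLimit (max_nonzero : Option Int) : Option Int :=
  match max_nonzero with
  | some m => if m ≠ 0 then some m else none
  | none => none

def all_coeff_vectors_alt (S : Int) (coeffs : List Int) (max_nonzero : Option Int) : List (List Int) :=
  ((List.range S.toNat).foldl (fun lv _ => pvStep coeffs (pvLimit max_nonzero) lv) [([], 0)]).filterMap
    (fun p => if p.2 ≠ 0 then some p.1 else none)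

-- ===== PRECONDITION & SPEC =====
-- Pre_ excludes only negative S, on which A raises ValueError (itertools.product rejects repeat < 0).
def Pre_all_coeff_vectors (S : Int) (coeffs : List Int) (max_nonzero : Option Int) : Prop := 0 ≤ S
instance (S : Int) (coeffs : List Int) (max_nonzero : Option Int) : Decidable (Pre_all_coeff_vectors S coeffs max_nonzero) := by unfold Pre_all_coeff_vectors; infer_instance
def pvWitness_all_coeff_vectors : Int × List Int × Option Int := (2, [-1, 0, 1], some 1)

def Spec_all_coeff_vectors (S : Int) (coeffs : List Int) (max_nonzero : Option Int) (out : List (List Int)) : Prop := out = all_coeff_vectors_alt S coeffs max_nonzero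
instance (S : Int) (coeffs : List Int) (max_nonzero : Option Int) (out : List (List Int)) : Decidable (Spec_all_coeff_vectors S coeffs max_nonzero out) := by unfold Spec_all_coeff_vectors; infer_instance

-- ===== CLAIM (what is proved, stated in full; the proofs are below) =====
def Claim_equal_all_coeff_vectors : Prop := ∀ (S : Int) (coeffs : List Int) (max_nonzero : Option Int), Dom_all_coeff_vectors S coeffs max_nonzero → Pre_all_coeff_vectors S coeffs max_nonzero → Spec_all_coeff_vectors S coeffs max_nonzero (all_coeff_vectors S coeffs max_nonzero)

-- ===== LEMMAS AND PROOFS =====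

-- A's append-unless-skipped foldl is a filter over the product list
lemma aux_A_filter (l : List (List Int)) (q : List Int → Bool) :
    l.foldl (fun out vec => if ¬ vec.any (· ≠ 0) then out else if q vec then out else out ++ [vec]) []
    = l.filter (fun vec => vec.any (· ≠ 0) && !(q vec)) := by
  have h := PySem.List.foldl_append_if_eq_filter (l := l)
    (p := fun vec => vec.any (· ≠ 0) && !(q vec)) (acc := ([] : List (List Int)))
  simp only [List.nil_append] at h
  rw [← h]
  apply PySem.List.foldl_congr_mem
  intro acc x _
  by_cases h1 : x.any (· ≠ 0) <;> by_cases h2 : q x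
  · rw [if_neg (not_not_intro h1), if_pos h2, if_neg (by rw [Bool.and_eq_true]; rintro ⟨_, hb⟩; simp [h2] at hb)]
  · rw [if_neg (not_not_intro h1), if_neg h2, if_pos (by rw [Bool.and_eq_true]; exact ⟨h1, by simp [h2]⟩)]
  · rw [if_pos h1, if_neg (by rw [Bool.and_eq_true]; rintro ⟨ha, _⟩; exact h1 ha)]
  · rw [if_pos h1, if_neg (by rw [Bool.and_eq_true]; rintro ⟨ha, _⟩; exact h1 ha)]

-- the product built by extending on the right (as B's levels grow) equals pvProduct
lemma aux_product_snoc (coeffs : List Int) (n : Nat) :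
    pvProduct coeffs (n + 1) = (pvProduct coeffs n).flatMap (fun t => coeffs.map (fun c => t ++ [c])) := by
  induction n with
  | zero => simp [pvProduct, ← List.map_eq_flatMap]
  | succ r ih =>
    rw [show pvProduct coeffs (r + 1 + 1) = coeffs.flatMap (fun c => (pvProduct coeffs (r + 1)).map (fun t => c :: t)) from rfl]
    conv_lhs => rw [ih]
    conv_rhs => rw [show pvProduct coeffs (r + 1) = coeffs.flatMap (fun c => (pvProduct coeffs r).map (fun t => c :: t)) from rfl]
    simp [List.map_flatMap, List.flatMap_map, List.map_map, Function.comp_def, List.cons_append, List.flatMap_assoc]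

-- guarded filterMap then flatMap = flatMap with a guard
lemma aux_filterMap_flatMap {α β γ : Type} (l : List α) (q : α → Bool) (h : α → β) (F : β → List γ) :
    (l.filterMap (fun v => if q v then some (h v) else none)).flatMap F
    = l.flatMap (fun v => if q v then F (h v) else []) := by
  induction l with
  | nil => rfl
  | cons a t ih =>
    by_cases hq : q a <;> simp [List.filterMap_cons, hq, List.flatMap_cons, ih]

-- guarded filterMap then guarded projection = a single filter
lemma aux_filterMap_comp {α : Type} (l : List α) (q : α → Bool) (g : α → Int) :
    ((l.filterMap (fun v => if q v then some (v, g v) else none)).filterMap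
        (fun p => if p.2 = 0 then none else some p.1))
    = l.filter (fun v => q v && !decide (g v = 0)) := by
  induction l with
  | nil => rfl
  | cons a t ih =>
    by_cases hq : q a <;> by_cases hg : g a = 0 <;>
      simp [List.filterMap_cons, List.filter_cons, hq, hg, ih]

-- pruning is monotone in the running count
lemma aux_keep_mono (limit : Option Int) (a b : Int) (hab : a ≤ b) (h : pvKeep limit a = false) :
    pvKeep limit b = false := by
  cases limit with
  | none => simp [pvKeep] at h
  | some l => simp only [pvKeep, decide_eq_false_iff_not, not_le] at h ⊢; omega

-- B's level after n iterations: the kept prefixes of length n with their counts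
lemma aux_level (coeffs : List Int) (limit : Option Int) :
    ∀ n : Nat, (List.range n).foldl (fun lv _ => pvStep coeffs limit lv) [([], 0)]
    = if n = 0 then [(([] : List Int), (0 : Int))]
      else (pvProduct coeffs n).filterMap (fun v =>
        if pvKeep limit (v.countP (· ≠ 0) : Int) then some (v, ((v.countP (· ≠ 0) : Nat) : Int)) else none) := by
  intro n
  induction n with
  | zero => simp
  | succ r ih =>
    rw [List.range_succ, List.foldl_append, ih]
    simp only [List.foldl_cons, List.foldl_nil]
    by_cases hr : r = 0
    · subst hr
      rw [if_pos rfl, if_neg (by omega)]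
      rw [show pvProduct coeffs 1 = coeffs.flatMap (fun c => [[c]]) by simp [pvProduct]]
      rw [show (coeffs.flatMap (fun c => [[c]])) = coeffs.map (fun c => [c]) by simp [← List.map_eq_flatMap]]
      rw [List.filterMap_map]
      simp only [pvStep, List.flatMap_cons, List.flatMap_nil, List.append_nil]
      apply List.filterMap_congr
      intro c _
      have hc : ((([c] : List Int).countP (· ≠ 0) : Nat) : Int) = (0 : Int) + (if c ≠ 0 then 1 else 0) := by
        by_cases h : c = 0 <;> simp [List.countP_cons, h]
      simp only [Function.comp, List.nil_append]
      rw [hc]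
    · rw [if_neg hr, if_neg (by omega)]
      rw [aux_product_snoc, List.filterMap_flatMap]
      unfold pvStep
      rw [aux_filterMap_flatMap (l := pvProduct coeffs r)
            (q := fun v => pvKeep limit ((List.countP (fun x => decide (x ≠ 0)) v : Nat) : Int))
            (h := fun (v : List Int) => (v, ((List.countP (fun x => decide (x ≠ 0)) v : Nat) : Int)))]
      apply List.flatMap_congr
      intro t _
      by_cases hq : pvKeep limit (t.countP (· ≠ 0) : Int) = true
      · rw [if_pos hq, List.filterMap_map]
        apply List.filterMap_congr
        intro c _
        have hc : (((t ++ [c]).countP (· ≠ 0) : Nat) : Int) = ((t.countP (· ≠ 0) : Nat) : Int) + (if c ≠ 0 then 1 else 0) := by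
          by_cases h : c = 0 <;> simp [List.countP_append, List.countP_cons, h]
        simp only [Function.comp]
        rw [hc]
      · rw [if_neg hq, List.filterMap_map]
        symm
        rw [List.filterMap_eq_nil_iff]
        intro c _
        have hc : (((t ++ [c]).countP (· ≠ 0) : Nat) : Int) = ((t.countP (· ≠ 0) : Nat) : Int) + (if c ≠ 0 then 1 else 0) := by
          by_cases h : c = 0 <;> simp [List.countP_append, List.countP_cons, h]
        have hle : ((t.countP (· ≠ 0) : Nat) : Int) ≤ (((t ++ [c]).countP (· ≠ 0) : Nat) : Int) := by
          rw [hc]; by_cases h : c = 0 <;> simp [h] <;> omega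
        have hmono : pvKeep limit (((t ++ [c]).countP (· ≠ 0) : Nat) : Int) = false :=
          aux_keep_mono limit _ _ hle (by simpa using hq)
        simp only [Function.comp]
        rw [hmono]
        simp

-- 'any(vec)' agrees with 'count of nonzeros is nonzero'
lemma aux_any (vec : List Int) :
    (vec.any (· ≠ 0)) = decide ((vec.countP (· ≠ 0) : Int) ≠ 0) := by
  by_cases h : vec.any (· ≠ 0) = true
  · have : 0 < vec.countP (· ≠ 0) := List.countP_pos_iff.mpr (by simpa using h)
    simp only [h]
    symm
    simp only [decide_eq_true_eq]
    omega
  · have h' : vec.countP (· ≠ 0) = 0 := by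
      rw [List.countP_eq_zero]
      intro a ha
      simp only [List.any_eq_true, not_exists, not_and] at h
      exact h a ha
    rw [Bool.not_eq_true] at h
    rw [h, h']
    simp

-- A's truthy limit test is the negation of B's keep test
lemma aux_over_keep (mx : Option Int) (vec : List Int) :
    (!(pvOver mx vec)) = pvKeep (pvLimit mx) (vec.countP (· ≠ 0) : Int) := by
  cases mx with
  | none => rfl
  | some m =>
    by_cases hm : m = 0
    · simp [pvOver, pvKeep, pvLimit, hm]
    · simp only [pvLimit, hm, ne_eq, not_false_eq_true, if_pos]
      simp only [pvOver, pvKeep, hm, ne_eq, not_false_eq_true, decide_true, Bool.true_and]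
      rw [← decide_not]
      exact decide_eq_decide.mpr (by omega)

-- ===== VERDICT (by name: the statement is the Claim_ definition above) =====
theorem all_coeff_vectors_spec : Claim_equal_all_coeff_vectors := by
  intro S coeffs mx _ hPre
  unfold Pre_all_coeff_vectors at hPre
  unfold Spec_all_coeff_vectors all_coeff_vectors all_coeff_vectors_alt
  rw [if_neg (by omega : ¬ S < 0)]
  rw [aux_A_filter, aux_level]
  by_cases hn : S.toNat = 0
  · rw [hn, if_pos rfl]
    rw [show pvProduct coeffs 0 = [[]] from rfl]
    simp
  · simp only [ne_eq, ite_not]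
    rw [if_neg hn, aux_filterMap_comp (l := pvProduct coeffs S.toNat)
          (q := fun v => pvKeep (pvLimit mx) ((List.countP (fun x => decide (x ≠ 0)) v : Nat) : Int))
          (g := fun v => ((List.countP (fun x => decide (x ≠ 0)) v : Nat) : Int))]
    apply List.filter_congr
    intro vec _
    rw [aux_any, aux_over_keep]
    rw [Bool.and_comm]
    simp only [ne_eq, decide_not]
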